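-- pv_equiv track=rewrite | github.com/Eibriel/MultiIntentModel | Data.py | message_to_batch
-- ===== SOURCE A (Python) =====
-- def message_to_batch(message, batch_length):
--     start = 1
--     end = 1 + batch_length
--     for n in range(batch_length):
--         message = [0] + message
--         message = message + [0]
--     batches = []
--     for n in range(len(message) - batch_length - 1):
--         batches.append(message[start + n:end + n])
--     return batches
-- ===== SOURCE B (Python) =====
-- def message_to_batch(message, batch_length):
--     n = len(message)
--     off = batch_length - 1
--     return [[message[i - off + k] if 0 <= i - off + k < n else 0
--              for k in range(batch_length)]
--             for i in range(n + batch_length - 1)]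
-- ===== Notes on version B (the rewrite author's own statement) =====
-- stated objective: alternative
-- what changed: B never builds the zero-padded list: it computes each window directly by index arithmetic (element k of window i is message[i-(batch_length-1)+k] when in range, else 0), instead of A's pad-then-slice over a mutated copy.
-- outside the precondition, e.g. on message_to_batch([1, 2, 3], -2): A returns [[2], [], [], []], B returns []
import Mathlib
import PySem

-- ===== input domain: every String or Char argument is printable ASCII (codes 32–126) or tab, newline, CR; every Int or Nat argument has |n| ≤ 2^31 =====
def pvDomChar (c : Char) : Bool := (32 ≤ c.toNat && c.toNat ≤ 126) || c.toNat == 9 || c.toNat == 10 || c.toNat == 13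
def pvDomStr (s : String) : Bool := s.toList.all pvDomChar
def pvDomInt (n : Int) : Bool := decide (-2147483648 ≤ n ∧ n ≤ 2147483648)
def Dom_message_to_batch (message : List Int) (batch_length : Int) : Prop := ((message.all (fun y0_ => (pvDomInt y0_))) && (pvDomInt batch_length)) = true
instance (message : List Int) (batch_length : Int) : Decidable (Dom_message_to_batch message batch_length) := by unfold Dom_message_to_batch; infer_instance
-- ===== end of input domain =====

-- B computes each sliding window directly by index arithmetic with zero-fill, instead of
-- A's building of a zero-padded copy of the list and slicing it (alternative decomposition).

-- ===== PORT A =====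
def message_to_batch (message : List Int) (batch_length : Int) : List (List Int) :=
  let start : Int := 1
  let stop : Int := 1 + batch_length
  let msg := (PySem.List.pyRange 0 batch_length 1).foldl
      (fun m (_ : Int) => ([0] ++ m) ++ [0]) message
  (PySem.List.pyRange 0 ((msg.length : Int) - batch_length - 1) 1).foldl
      (fun batches n => batches ++ [PySem.List.slice msg (some (start + n)) (some (stop + n))]) []

-- ===== PORT B =====
def message_to_batch_alt (message : List Int) (batch_length : Int) : List (List Int) :=
  let n : Int := message.length
  let off : Int := batch_length - 1
  (PySem.List.pyRange 0 (n + batch_length - 1) 1).map (fun i =>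
    (PySem.List.pyRange 0 batch_length 1).map (fun k =>
      if 0 ≤ i - off + k ∧ i - off + k < n then PySem.List.pyGetD message (i - off + k) 0 else 0))

-- ===== PRECONDITION & SPEC =====
-- Pre_ restricts to the natural domain of a non-negative window length: for batch_length < 0
-- A still returns a value, but it is an accident of Python's negative-slice wrap-around
-- (e.g. A([1,2,3], -2) = [[2],[],[],[]]), which no caller of a batching routine would specify.
def Pre_message_to_batch (message : List Int) (batch_length : Int) : Prop :=
  0 ≤ batch_length
instance (message : List Int) (batch_length : Int) : Decidable (Pre_message_to_batch message batch_length) := by unfold Pre_message_to_batch; infer_instance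

def pvWitness_message_to_batch : List Int × Int := ([3, 1, 4], 2)

def Spec_message_to_batch (message : List Int) (batch_length : Int) (out : List (List Int)) : Prop := out = message_to_batch_alt message batch_length
instance (message : List Int) (batch_length : Int) (out : List (List Int)) : Decidable (Spec_message_to_batch message batch_length out) := by unfold Spec_message_to_batch; infer_instance

-- ===== CLAIM (what is proved, stated in full; the proofs are below) =====
def Claim_equal_message_to_batch : Prop := ∀ (message : List Int) (batch_length : Int), Dom_message_to_batch message batch_length → Pre_message_to_batch message batch_length → Spec_message_to_batch message batch_length (message_to_batch message batch_length)

-- ===== LEMMAS AND PROOFS =====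

lemma replicate_cons_shift (n : Nat) (ys : List Int) :
    List.replicate n (0:Int) ++ 0 :: ys = 0 :: (List.replicate n 0 ++ ys) := by
  rw [← List.singleton_append, ← List.append_assoc, ← List.replicate_succ',
    List.replicate_succ, List.cons_append]

-- A's padding loop builds batch_length zeros on each side of the message.
lemma foldl_pad (l : List Int) (msg : List Int) :
    l.foldl (fun m (_ : Int) => ([0] ++ m) ++ [0]) msg
      = List.replicate l.length (0:Int) ++ msg ++ List.replicate l.length 0 := by
  induction l generalizing msg with
  | nil => simp
  | cons a l ih =>
      simp only [List.foldl_cons, ih, List.length_cons, List.replicate_succ]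
      simp only [List.append_assoc, List.cons_append]
      rw [replicate_cons_shift]
      simp

-- One slice of the padded list equals B's index-arithmetic window.
lemma window_eq (message : List Int) (b : Nat) (n : Int) (hn : 0 ≤ n)
    (hn2 : n < (message.length : Int) + b - 1) :
    PySem.List.slice (List.replicate b (0:Int) ++ message ++ List.replicate b 0)
        (some (1 + n)) (some (1 + (b:Int) + n))
      = (PySem.List.pyRange 0 (b:Int) 1).map (fun k =>
          if 0 ≤ n - ((b:Int) - 1) + k ∧ n - ((b:Int) - 1) + k < (message.length:Int)
          then PySem.List.pyGetD message (n - ((b:Int) - 1) + k) 0 else 0) := by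
  rw [PySem.List.slice_toNat _ (by omega) (by omega)]
  have hb : (1 + (b:Int) + n).toNat - (1 + n).toNat = b := by omega
  rw [hb]
  apply List.ext_getElem
  · simp [PySem.List.length_pyRange_one]
    omega
  · intro k h1 h2
    have hk : k < b := by simpa [PySem.List.length_pyRange_one] using h2
    simp only [List.getElem_take, List.getElem_drop, List.getElem_map,
      PySem.List.getElem_pyRange_one, zero_add]
    by_cases hmid : (1 + n).toNat + k < b + message.length
    · rw [List.getElem_append_left (by simp only [List.length_append, List.length_replicate]; omega)]
      by_cases hlt : (1 + n).toNat + k < b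
      · rw [List.getElem_append_left (by simpa using hlt), List.getElem_replicate,
          if_neg (by omega)]
      · rw [List.getElem_append_right (by simpa using not_lt.mp hlt)]
        rw [if_pos ⟨by omega, by omega⟩]
        rw [PySem.List.pyGetD_eq_getElem message 0 (by omega) (by omega)]
        congr 1
        simp only [List.length_replicate]
        omega
    · rw [List.getElem_append_right (by simp only [List.length_append, List.length_replicate]; omega)]
      rw [List.getElem_replicate, if_neg (by omega)]

-- ===== VERDICT (by name: the statement is the Claim_ definition above) =====
theorem message_to_batch_spec : Claim_equal_message_to_batch := by
  intro message batch_length _hdom hpre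
  unfold Spec_message_to_batch
  obtain ⟨b, rfl⟩ : ∃ b : Nat, batch_length = (b : Int) :=
    ⟨batch_length.toNat, (Int.toNat_of_nonneg hpre).symm⟩
  unfold message_to_batch message_to_batch_alt
  rw [foldl_pad]
  have hlen : ((PySem.List.pyRange 0 (b:Int) 1).length) = b := by
    simp [PySem.List.length_pyRange_one]
  rw [hlen, PySem.List.foldl_append_singleton_eq_map]
  have hplen : ((List.replicate b (0:Int) ++ message ++ List.replicate b 0).length : Int)
      = (message.length : Int) + 2 * b := by
    push_cast [List.length_append, List.length_replicate]; ring
  rw [hplen, show (message.length:Int) + 2*(b:Int) - b - 1 = (message.length:Int) + b - 1 by ring]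
  apply List.map_congr_left
  intro n hn
  rw [PySem.List.mem_pyRange_one] at hn
  exact window_eq message b n hn.1 hn.2
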